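-- pv_equiv track=rewrite | github.com/devin-distyl/webarena | distyl_webarena/utils/web_utils.py | is_webarena_site
-- ===== SOURCE A (Python) =====
-- def is_webarena_site(url: str) -> bool:
--     """Check if URL belongs to a WebArena site"""
--
--     webarena_ports = ["7770", "7780", "9999", "8023", "8888", "3000", "4399"]
--
--     for port in webarena_ports:
--         if port in url:
--             return True
--
--     webarena_domains = ["localhost", "onestopmarket", "reddit", "gitlab", "wikipedia"]
--
--     for domain in webarena_domains:
--         if domain in url.lower():
--             return True
--
--     return False
-- ===== SOURCE B (Python) =====
-- # B: multi-pattern substring matching via a character trie of the tokens,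
-- # scanned once over the lowercased URL, instead of twelve independent
-- # substring-membership tests.
--
-- _TOKENS = ["7770", "7780", "9999", "8023", "8888", "3000", "4399",
--            "localhost", "onestopmarket", "reddit", "gitlab", "wikipedia"]
--
--
-- def _build_trie(tokens):
--     # nodes[i] = [terminal, edges]; edges maps a char to a child node index
--     nodes = [[False, {}]]
--     for t in tokens:
--         cur = 0
--         for ch in t:
--             nxt = nodes[cur][1].get(ch)
--             if nxt is None:
--                 nodes.append([False, {}])
--                 nxt = len(nodes) - 1
--                 nodes[cur][1][ch] = nxt
--             cur = nxt
--         nodes[cur][0] = True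
--     return nodes
--
--
-- _TRIE = _build_trie(_TOKENS)
--
--
-- def _match_at(s, i):
--     cur = 0
--     for j in range(i, len(s)):
--         nxt = _TRIE[cur][1].get(s[j])
--         if nxt is None:
--             return False
--         cur = nxt
--         if _TRIE[cur][0]:
--             return True
--     return False
--
--
-- def is_webarena_site(url: str) -> bool:
--     """Check if URL belongs to a WebArena site"""
--     low = url.lower()
--     return any(_match_at(low, i) for i in range(len(low)))
-- ===== Notes on version B (the rewrite author's own statement) =====
-- stated objective: alternative
-- what changed: A runs twelve independent substring-membership tests (ports against the raw URL, then domains against the lowercased URL); B builds a character trie of all twelve tokens once and scans the lowercased URL with a single trie-directed walk per position, so no per-token scan remains (digit tokens are invariant under lowercasing).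
import Mathlib
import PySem

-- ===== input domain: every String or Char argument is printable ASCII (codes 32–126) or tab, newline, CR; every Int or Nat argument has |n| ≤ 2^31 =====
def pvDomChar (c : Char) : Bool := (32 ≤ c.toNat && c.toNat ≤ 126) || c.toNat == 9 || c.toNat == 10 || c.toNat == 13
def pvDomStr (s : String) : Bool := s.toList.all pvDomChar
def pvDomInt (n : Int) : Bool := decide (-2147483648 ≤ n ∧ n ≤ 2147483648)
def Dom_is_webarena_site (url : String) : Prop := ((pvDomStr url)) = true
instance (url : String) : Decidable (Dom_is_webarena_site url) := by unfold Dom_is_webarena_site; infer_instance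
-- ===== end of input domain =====

-- B replaces A's twelve independent substring-membership tests by a character trie of the
-- tokens, built once and walked over the lowercased URL (alternative data structure, same cost).

-- ===== PORT A =====
def is_webarena_site (url : String) : Bool :=
  let webarena_ports : List String := ["7770", "7780", "9999", "8023", "8888", "3000", "4399"]
  if webarena_ports.any (fun port => PySem.Str.isIn port url) then true
  else
    let webarena_domains : List String := ["localhost", "onestopmarket", "reddit", "gitlab", "wikipedia"]
    if webarena_domains.any (fun domain => PySem.Str.isIn domain (PySem.Str.lower url)) then true
    else false

-- ===== PORT B =====
def trieTokens : List String :=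
  ["7770", "7780", "9999", "8023", "8888", "3000", "4399",
   "localhost", "onestopmarket", "reddit", "gitlab", "wikipedia"]

-- Python's nodes[i] (indices produced by the build are always in range)
def nodeAt (nodes : List (Bool × PySem.Dict Char Nat)) (i : Nat) : Bool × PySem.Dict Char Nat :=
  nodes.getD i (false, PySem.Dict.empty)

-- _build_trie: nodes[i] = (terminal, edges); edges maps a char to a child node index
def buildTrie (tokens : List String) : List (Bool × PySem.Dict Char Nat) :=
  tokens.foldl (fun nodes t =>
    let st := t.toList.foldl (fun (st : List (Bool × PySem.Dict Char Nat) × Nat) ch =>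
        match (nodeAt st.1 st.2).2.get? ch with
        | some nxt => (st.1, nxt)
        | none =>
            let nodes := st.1 ++ [(false, PySem.Dict.empty)]
            let nxt := nodes.length - 1
            (nodes.set st.2 ((nodeAt nodes st.2).1, (nodeAt nodes st.2).2.insert ch nxt), nxt))
      (nodes, 0)
    st.1.set st.2 (true, (nodeAt st.1 st.2).2))
  [(false, PySem.Dict.empty)]

def theTrie : List (Bool × PySem.Dict Char Nat) := buildTrie trieTokens

-- _match_at: follow trie edges along s[i:], succeeding when a terminal node is reached
def trieWalk (nodes : List (Bool × PySem.Dict Char Nat)) : Nat → List Char → Bool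
  | _, [] => false
  | cur, ch :: rest =>
    match (nodeAt nodes cur).2.get? ch with
    | none => false
    | some nxt => if (nodeAt nodes nxt).1 then true else trieWalk nodes nxt rest

def is_webarena_site_alt (url : String) : Bool :=
  let low := PySem.Str.lower url
  (PySem.List.pyRange 0 (PySem.Str.len low) 1).any (fun i =>
    trieWalk theTrie 0 (low.toList.drop i.toNat))

-- ===== PRECONDITION & SPEC =====
def Spec_is_webarena_site (url : String) (out : Bool) : Prop := out = is_webarena_site_alt url
instance (url : String) (out : Bool) : Decidable (Spec_is_webarena_site url out) := by unfold Spec_is_webarena_site; infer_instance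

-- ===== CLAIM (what is proved, stated in full; the proofs are below) =====
def Claim_equal_is_webarena_site : Prop := ∀ (url : String), Dom_is_webarena_site url → Spec_is_webarena_site url (is_webarena_site url)

-- ===== LEMMAS AND PROOFS =====

-- LsTable[i] = the strings accepted by a trie walk starting at node i (computed offline; certified by step_ok below)
def LsTable : List (List String) := [
  ["7770", "7780", "9999", "8023", "8888", "3000", "4399", "localhost", "onestopmarket", "reddit", "gitlab", "wikipedia"],
  ["770", "780"],
  ["70", "80"],
  ["0"],
  [],
  ["0"],
  [],
  ["999"],
  ["99"],
  ["9"],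
  [],
  ["023", "888"],
  ["23"],
  ["3"],
  [],
  ["88"],
  ["8"],
  [],
  ["000"],
  ["00"],
  ["0"],
  [],
  ["399"],
  ["99"],
  ["9"],
  [],
  ["ocalhost"],
  ["calhost"],
  ["alhost"],
  ["lhost"],
  ["host"],
  ["ost"],
  ["st"],
  ["t"],
  [],
  ["nestopmarket"],
  ["estopmarket"],
  ["stopmarket"],
  ["topmarket"],
  ["opmarket"],
  ["pmarket"],
  ["market"],
  ["arket"],
  ["rket"],
  ["ket"],
  ["et"],
  ["t"],
  [],
  ["eddit"],
  ["ddit"],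
  ["dit"],
  ["it"],
  ["t"],
  [],
  ["itlab"],
  ["tlab"],
  ["lab"],
  ["ab"],
  ["b"],
  [],
  ["ikipedia"],
  ["kipedia"],
  ["ipedia"],
  ["pedia"],
  ["edia"],
  ["dia"],
  ["ia"],
  ["a"],
  []]

def LsAt (i : Nat) : List (List Char) := (LsTable.getD i []).map String.toList

def stepAt (idx : Nat) : List (List Char) :=
  ((nodeAt theTrie idx).2.items).flatMap (fun p =>
    ((if (nodeAt theTrie p.2).1 then [([] : List Char)] else []) ++ LsAt p.2).map (p.1 :: ·))

set_option maxRecDepth 100000 in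
lemma trie_len : theTrie.length = 69 := by decide

lemma ls_len : LsTable.length = 69 := by decide

set_option maxRecDepth 100000 in
lemma step_ok_lt : (List.range 69).all (fun i => LsAt i == stepAt i) = true := by decide

set_option maxRecDepth 100000 in
lemma nodup_keys_lt : (List.range 69).all (fun i => decide ((nodeAt theTrie i).2.keys.Nodup)) = true := by decide

lemma nodeAt_ge (idx : Nat) (h : 69 ≤ idx) : nodeAt theTrie idx = (false, PySem.Dict.empty) := by
  unfold nodeAt
  rw [List.getD_eq_getElem?_getD, List.getElem?_eq_none (by rw [trie_len]; omega)]
  rfl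

lemma LsAt_ge (idx : Nat) (h : 69 ≤ idx) : LsAt idx = [] := by
  unfold LsAt
  rw [List.getD_eq_getElem?_getD, List.getElem?_eq_none (by rw [ls_len]; omega)]
  rfl

lemma step_ok (idx : Nat) : LsAt idx = stepAt idx := by
  rcases lt_or_ge idx 69 with h | h
  · have := List.all_eq_true.mp step_ok_lt idx (List.mem_range.mpr h)
    exact eq_of_beq (by simpa using this)
  · rw [LsAt_ge idx h]
    unfold stepAt
    rw [nodeAt_ge idx h]
    rfl

lemma nodup_keys (idx : Nat) : (nodeAt theTrie idx).2.keys.Nodup := by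
  rcases lt_or_ge idx 69 with h | h
  · have := List.all_eq_true.mp nodup_keys_lt idx (List.mem_range.mpr h)
    simpa using this
  · rw [nodeAt_ge idx h]
    simp

lemma mem_LsAt {p : List Char} {idx : Nat} :
    p ∈ LsAt idx ↔ ∃ kn ∈ (nodeAt theTrie idx).2.items, ∃ r,
      (r ∈ (if (nodeAt theTrie kn.2).1 then [([] : List Char)] else []) ++ LsAt kn.2) ∧ p = kn.1 :: r := by
  rw [step_ok]
  unfold stepAt
  simp only [List.mem_flatMap, List.mem_map]
  constructor
  · rintro ⟨kn, hkn, r, hr, hpr⟩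
    exact ⟨kn, hkn, r, hr, hpr.symm⟩
  · rintro ⟨kn, hkn, r, hr, hpr⟩
    exact ⟨kn, hkn, r, hr, hpr.symm⟩

lemma not_nil_mem_LsAt (idx : Nat) : ([] : List Char) ∉ LsAt idx := by
  rw [mem_LsAt]
  rintro ⟨kn, _, r, _, h⟩
  cases h

lemma walk_iff (s : List Char) : ∀ idx : Nat,
    trieWalk theTrie idx s = true ↔ ∃ p ∈ LsAt idx, p <+: s := by
  induction s with
  | nil =>
    intro idx
    simp only [trieWalk]
    constructor
    · intro h; cases h
    · rintro ⟨p, hp, hpre⟩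
      have hp0 : p = [] := List.prefix_nil.mp hpre
      exact absurd (hp0 ▸ hp) (not_nil_mem_LsAt idx)
  | cons c s' ih =>
    intro idx
    have hnd := nodup_keys idx
    constructor
    · intro h
      simp only [trieWalk] at h
      cases hg : (nodeAt theTrie idx).2.get? c with
      | none => rw [hg] at h; cases h
      | some nxt =>
        rw [hg] at h
        have h' : (if (nodeAt theTrie nxt).1 = true then true else trieWalk theTrie nxt s') = true := h
        have hitems : (c, nxt) ∈ (nodeAt theTrie idx).2.items :=
          PySem.Dict.mem_items_of_get?_eq_some _ hg
        by_cases ht : (nodeAt theTrie nxt).1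
        · refine ⟨c :: [], ?_, by simp⟩
          rw [mem_LsAt]
          exact ⟨(c, nxt), hitems, [], by simp [ht], rfl⟩
        · rw [if_neg ht] at h'
          obtain ⟨r, hr, hrpre⟩ := (ih nxt).mp h' 
          refine ⟨c :: r, ?_, by simpa using hrpre⟩
          rw [mem_LsAt]
          exact ⟨(c, nxt), hitems, r, by simp [ht, hr], rfl⟩
    · rintro ⟨p, hp, hpre⟩
      rw [mem_LsAt] at hp
      obtain ⟨⟨c', n⟩, hkn, r, hr, hpeq⟩ := hp
      subst hpeq
      simp only at hr
      obtain ⟨heq, hrpre⟩ := List.cons_prefix_cons.mp hpre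
      subst heq
      have hg : (nodeAt theTrie idx).2.get? c' = some n :=
        (PySem.Dict.get?_eq_some_iff_mem_items _ _ _ hnd).mpr hkn
      simp only [trieWalk, hg]
      show (if (nodeAt theTrie n).1 = true then true else trieWalk theTrie n s') = true
      by_cases ht : (nodeAt theTrie n).1
      · simp [ht]
      · rw [if_neg ht, List.nil_append] at hr
        rw [if_neg ht]
        exact (ih n).mpr ⟨r, hr, hrpre⟩

-- every accepted string is nonempty (used to bound the scan index)
lemma LsAt_zero : LsAt 0 = trieTokens.map String.toList := by decide

lemma alt_iff (url : String) :
    is_webarena_site_alt url = true ↔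
      ∃ t ∈ trieTokens, PySem.Chars.isIn t.toList (PySem.Chars.lower url.toList) = true := by
  unfold is_webarena_site_alt
  simp only [List.any_eq_true, PySem.List.mem_pyRange_one, PySem.Str.toList_lower, PySem.Str.len_eq]
  constructor
  · rintro ⟨i, _, hw⟩
    obtain ⟨p, hp, hpre⟩ := (walk_iff _ 0).mp hw
    rw [LsAt_zero, List.mem_map] at hp
    obtain ⟨t, ht, rfl⟩ := hp
    exact ⟨t, ht, (PySem.Chars.exists_prefix_drop_iff_isIn _ _).mp ⟨i.toNat, hpre⟩⟩
  · rintro ⟨t, ht, hin⟩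
    obtain ⟨j, hpre⟩ := (PySem.Chars.exists_prefix_drop_iff_isIn _ _).mpr hin
    set low := PySem.Chars.lower url.toList with hlow
    have htne : t.toList ≠ [] := by
      simp only [trieTokens, List.mem_cons, List.not_mem_nil, or_false] at ht
      rcases ht with rfl | rfl | rfl | rfl | rfl | rfl | rfl | rfl | rfl | rfl | rfl | rfl <;> decide
    have hjlt : j < low.length := by
      by_contra hge
      have : low.drop j = [] := List.drop_eq_nil_of_le (by omega)
      rw [this] at hpre
      exact htne (List.prefix_nil.mp hpre)
    refine ⟨(j : Int), ⟨by positivity, by exact_mod_cast hjlt⟩, ?_⟩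
    rw [walk_iff _ 0, LsAt_zero]
    exact ⟨t.toList, List.mem_map_of_mem ht, by rwa [Int.toNat_natCast]⟩

lemma lowerChar_eq_digit_iff (x c : Char) (h : PySem.Chars.isdigit c = true) :
    PySem.Chars.lowerChar x = c ↔ x = c := by
  simp only [PySem.Chars.isdigit, Bool.and_eq_true, decide_eq_true_eq] at h
  have hc0 : 48 ≤ c.toNat := h.1
  have hc9 : c.toNat ≤ 57 := h.2
  unfold PySem.Chars.lowerChar
  split
  · rename_i hu
    simp only [PySem.Chars.isupper, Bool.and_eq_true, decide_eq_true_eq] at hu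
    have h1 : 65 ≤ x.toNat := hu.1
    have h2 : x.toNat ≤ 90 := hu.2
    have hv : (x.toNat + 32).isValidChar := by
      unfold Nat.isValidChar
      omega
    have ht : (Char.ofNat (x.toNat + 32)).toNat = x.toNat + 32 := by
      simp only [Char.ofNat, dif_pos hv, Char.ofNatAux]
      rw [Char.toNat]
      simp
      omega
    constructor
    · intro he
      exfalso
      have h3 := congrArg Char.toNat he
      rw [ht] at h3
      omega
    · intro he
      exfalso
      subst he
      omega
  · exact Iff.rfl

lemma map_lowerChar_eq_self_of_digits (t : List Char) (h : ∀ c ∈ t, PySem.Chars.isdigit c = true) :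
    t.map PySem.Chars.lowerChar = t := by
  have := List.map_congr_left (fun c hc => (lowerChar_eq_digit_iff c c (h c hc)).mpr rfl)
  simpa using this

lemma map_lowerChar_eq_digits (u t : List Char) (h : ∀ c ∈ t, PySem.Chars.isdigit c = true)
    (he : u.map PySem.Chars.lowerChar = t) : u = t := by
  induction u generalizing t with
  | nil => simpa using he.symm
  | cons a u ih =>
    cases t with
    | nil => simp at he
    | cons b t =>
      simp only [List.map_cons, List.cons.injEq] at he
      have hb : a = b := (lowerChar_eq_digit_iff a b (h b (by simp))).mp he.1
      have ht : u = t := ih t (fun c hc => h c (by simp [hc])) he.2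
      simp [hb, ht]

lemma isIn_lower_iff_of_digits (t l : List Char) (h : ∀ c ∈ t, PySem.Chars.isdigit c = true) :
    PySem.Chars.isIn t (PySem.Chars.lower l) = PySem.Chars.isIn t l := by
  have hl : PySem.Chars.lower l = l.map PySem.Chars.lowerChar := rfl
  rw [Bool.eq_iff_iff, PySem.Chars.isIn_iff_infix, PySem.Chars.isIn_iff_infix]
  constructor
  · rintro ⟨p, s, hps⟩
    rw [hl, List.append_assoc] at hps
    obtain ⟨p', rest, hlr, hp, hrest⟩ := List.map_eq_append_iff.mp hps.symm
    obtain ⟨t', s', hrs, ht', hs'⟩ := List.map_eq_append_iff.mp hrest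
    have het : t' = t := map_lowerChar_eq_digits t' t h ht'
    subst het
    exact ⟨p', s', by rw [hlr, hrs, List.append_assoc]⟩
  · rintro ⟨p, s, hps⟩
    refine ⟨p.map PySem.Chars.lowerChar, s.map PySem.Chars.lowerChar, ?_⟩
    rw [hl, ← hps]
    simp [map_lowerChar_eq_self_of_digits t h]

lemma a_iff (url : String) :
    is_webarena_site url = true ↔
      ((∃ t ∈ (["7770", "7780", "9999", "8023", "8888", "3000", "4399"] : List String),
          PySem.Chars.isIn t.toList url.toList = true) ∨
       (∃ t ∈ (["localhost", "onestopmarket", "reddit", "gitlab", "wikipedia"] : List String),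
          PySem.Chars.isIn t.toList (PySem.Chars.lower url.toList) = true)) := by
  have hA : is_webarena_site url =
      (((["7770", "7780", "9999", "8023", "8888", "3000", "4399"] : List String).any
          fun port => PySem.Str.isIn port url) ||
       ((["localhost", "onestopmarket", "reddit", "gitlab", "wikipedia"] : List String).any
          fun domain => PySem.Str.isIn domain (PySem.Str.lower url))) := by
    unfold is_webarena_site
    dsimp only
    split_ifs with h1 h2 <;> simp_all
  rw [hA]
  simp only [Bool.or_eq_true, List.any_eq_true, PySem.Str.isIn_eq, PySem.Str.toList_lower]

-- ===== VERDICT (by name: the statement is the Claim_ definition above) =====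
theorem is_webarena_site_spec : Claim_equal_is_webarena_site := by
  intro url _
  unfold Spec_is_webarena_site
  rw [Bool.eq_iff_iff, a_iff, alt_iff]
  have hports : ∀ t ∈ (["7770", "7780", "9999", "8023", "8888", "3000", "4399"] : List String),
      PySem.Chars.isIn t.toList (PySem.Chars.lower url.toList) = PySem.Chars.isIn t.toList url.toList := by
    intro t ht
    refine isIn_lower_iff_of_digits t.toList url.toList ?_
    simp only [List.mem_cons, List.not_mem_nil, or_false] at ht
    rcases ht with rfl | rfl | rfl | rfl | rfl | rfl | rfl <;>
      exact List.all_eq_true.mp rfl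
  have hsplit : trieTokens =
      (["7770", "7780", "9999", "8023", "8888", "3000", "4399"] : List String) ++
      ["localhost", "onestopmarket", "reddit", "gitlab", "wikipedia"] := rfl
  rw [hsplit]
  constructor
  · rintro (⟨t, ht, hin⟩ | ⟨t, ht, hin⟩)
    · exact ⟨t, List.mem_append_left _ ht, by rw [hports t ht]; exact hin⟩
    · exact ⟨t, List.mem_append_right _ ht, hin⟩
  · rintro ⟨t, ht, hin⟩
    rcases List.mem_append.mp ht with h | h
    · exact Or.inl ⟨t, h, by rw [← hports t h]; exact hin⟩
    · exact Or.inr ⟨t, h, hin⟩
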